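-- pv_equiv track=rewrite | github.com/parkjoowan97/BOJ | 백준/Gold/4563. 리벤지 오브 피타고라스/리벤지 오브 피타고라스.py | count
-- ===== SOURCE A (Python) =====
-- import math
--
-- def count(A):
--     cnt = 0
--     divisors = set()
--     for i in range(1, int(math.isqrt(A**2)) + 1):
--         if (A ** 2) % i == 0:
--             divisors.add(i)
--
--     for n in divisors:
--         m = (A ** 2) // n
--         if (m + n) % 2 == (m - n) % 2 and (m - n) % 2 == 0 and (m - n) // 2 > A:
--             cnt += 1
--     return cnt
-- ===== SOURCE B (Python) =====
-- import math
--
-- def count(A):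
--     a = abs(A)
--     # factor a = prod p**e by trial division, O(sqrt(a))
--     fac = []
--     n = a
--     p = 2
--     while p * p <= n:
--         if n % p == 0:
--             e = 0
--             while n % p == 0:
--                 n //= p
--                 e += 1
--             fac.append((p, e))
--         p += 1
--     if n > 1:
--         fac.append((n, 1))
--     # divisors of a**2: same primes with exponents doubled
--     divs = {1}
--     for (p, e) in fac:
--         divs = {d * p ** k for d in divs for k in range(2 * e + 1)}
--     cnt = 0
--     for d in divs:
--         if d <= a:
--             m = (a * a) // d
--             if (m - d) % 2 == 0 and (m - d) // 2 > A:
--                 cnt += 1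
--     return cnt
-- ===== Notes on version B (the rewrite author's own statement) =====
-- stated objective: faster
-- what changed: Instead of trial-dividing the square of A by every candidate up to its integer square root (which is abs(A)), B factorizes abs(A) by trial division up to its own square root, generates all divisors of the square from the prime factorization with doubled exponents, and tests the same parity/size condition on each divisor.
import Mathlib
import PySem

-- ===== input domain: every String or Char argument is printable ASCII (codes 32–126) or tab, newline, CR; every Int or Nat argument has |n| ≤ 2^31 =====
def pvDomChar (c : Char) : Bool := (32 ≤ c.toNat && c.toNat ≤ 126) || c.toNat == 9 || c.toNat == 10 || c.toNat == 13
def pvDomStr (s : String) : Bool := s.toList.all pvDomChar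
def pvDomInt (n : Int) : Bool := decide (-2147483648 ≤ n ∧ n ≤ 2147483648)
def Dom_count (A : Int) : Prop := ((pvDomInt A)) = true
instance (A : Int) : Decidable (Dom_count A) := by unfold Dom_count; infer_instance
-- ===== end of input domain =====

-- B is faster: it factorizes |A| in O(√A) and derives the divisors of A² from the prime
-- exponents instead of trial-dividing A² by every i up to isqrt(A²) = |A| (O(A)).

-- ===== PORT A =====
-- literal port of A: build the set of divisors of A**2 up to isqrt(A**2), then count those
-- satisfying the parity/size condition (the count is order-independent, so iterating the
-- set in insertion order is exact).
def count (A : Int) : Int :=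
  let a2 : Int := A ^ 2
  let isq : Int := ((a2.toNat.sqrt : Nat) : Int)  -- math.isqrt(A**2); exact: A**2 ≥ 0
  let divisors : PySem.Set Int :=
    (PySem.List.pyRange 1 (isq + 1) 1).foldl
      (fun s i => if PySem.Int.mod a2 i = 0 then PySem.Set.add s i else s)
      PySem.Set.empty
  divisors.foldl
    (fun cnt n =>
      let m := PySem.Int.floordiv a2 n
      if PySem.Int.mod (m + n) 2 = PySem.Int.mod (m - n) 2 ∧
         PySem.Int.mod (m - n) 2 = 0 ∧
         PySem.Int.floordiv (m - n) 2 > A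
       then cnt + 1 else cnt)
    0

-- ===== PORT B =====
-- inner dividing-out loop of Source B (`while n % p == ...: n //= p; e += ...`); the extra
-- positivity conjuncts in the guard only make the recursion total (the loop is only
-- reached with p at least two and n at least p*p).
def stripB (p : Nat) (n : Nat) (e : Nat) : Nat × Nat :=
  if h : 2 ≤ p ∧ 0 < n ∧ n % p = 0 then stripB p (n / p) (e + 1)
  else (n, e)
termination_by n
decreasing_by exact Nat.div_lt_self h.2.1 (by omega)

theorem stripB_fst_le (p : Nat) : ∀ n e, (stripB p n e).1 ≤ n := by
  intro n
  induction n using Nat.strong_induction_on with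
  | _ n ih =>
    intro e
    rw [stripB]
    split
    · rename_i h
      exact le_trans (ih (n / p) (Nat.div_lt_self h.2.1 (by omega)) (e + 1))
        (Nat.div_le_self n p)
    · exact le_refl n

-- outer `while p * p <= n` of Source B (trial division); the lower bound on p in the guard
-- only totalizes the recursion.
def facLoopB (p n : Nat) : List (Nat × Nat) :=
  if h : 2 ≤ p ∧ p * p ≤ n then
    if n % p = 0 then
      let s := stripB p n 0
      (p, s.2) :: facLoopB (p + 1) s.1
    else facLoopB (p + 1) n
  else if 1 < n then [(n, 1)] else []
termination_by n + 1 - p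
decreasing_by
  · have h1 : (stripB p (n / p) 1).1 ≤ n / p := stripB_fst_le p (n / p) 1
    have h2 : n / p < n := Nat.div_lt_self (by nlinarith) (by omega)
    have h3 : (stripB p n 0).1 ≤ n / p := by
      have hcond : 2 ≤ p ∧ 0 < n ∧ n % p = 0 := ⟨h.1, by nlinarith, by assumption⟩
      rw [stripB, dif_pos hcond]
      exact stripB_fst_le p (n / p) 1
    have hp : p ≤ n := le_trans (Nat.le_mul_of_pos_left p (by omega)) h.2
    omega
  · have hp : p ≤ n := le_trans (Nat.le_mul_of_pos_left p (by omega)) h.2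
    omega

-- literal port of Source B
def count_alt (A : Int) : Int :=
  let a : Nat := A.natAbs                      -- abs(A); every later value is a nonneg int
  let fac : List (Nat × Nat) := facLoopB 2 a
  let divs : PySem.Set Nat :=
    fac.foldl
      (fun ds pe =>
        PySem.Set.ofList (ds.flatMap (fun d => (List.range (2 * pe.2 + 1)).map (fun k => d * pe.1 ^ k))))
      (PySem.Set.ofList [1])
  divs.foldl
    (fun cnt d =>
      if d ≤ a then
        let m := a * a / d
        if (m - d) % 2 = 0 ∧ (((m - d) / 2 : Nat) : Int) > A then cnt + 1 else cnt
      else cnt)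
    0

-- ===== PRECONDITION & SPEC =====
def Spec_count (A : Int) (out : Int) : Prop := out = count_alt A
instance (A : Int) (out : Int) : Decidable (Spec_count A out) := by unfold Spec_count; infer_instance

-- ===== CLAIM (what is proved, stated in full; the proofs are below) =====
def Claim_equal_count : Prop := ∀ (A : Int), Dom_count A → Spec_count A (count A)

-- ===== LEMMAS AND PROOFS =====

-- Both ports count the n with 1 ≤ n ≤ a = |A|, n ∣ a², a²/n - n even and (a²/n - n)/2 > A;
-- refCount is that common reference value.
def refCount (A : Int) (a : Nat) : Nat :=
  ((List.range' 1 a).filter (fun n =>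
    decide (n ∣ a * a ∧ (a * a / n - n) % 2 = 0 ∧ (((a * a / n - n) / 2 : Nat) : Int) > A))).length

theorem stripB_spec (p : Nat) (hp : 2 ≤ p) : ∀ n, 0 < n → ∀ e,
    (stripB p n e).1 * p ^ ((stripB p n e).2 - e) = n ∧ ¬ p ∣ (stripB p n e).1 ∧
    e ≤ (stripB p n e).2 ∧ 0 < (stripB p n e).1 := by
  intro n
  induction n using Nat.strong_induction_on with
  | _ n ih =>
    intro hn e
    rw [stripB]
    split
    · rename_i h
      have hlt : n / p < n := Nat.div_lt_self h.2.1 (by omega)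
      have hpos : 0 < n / p := Nat.div_pos (Nat.le_of_dvd hn (Nat.dvd_iff_mod_eq_zero.mpr h.2.2)) (by omega)
      obtain ⟨h1, h2, h3, h4⟩ := ih (n / p) hlt hpos (e + 1)
      refine ⟨?_, h2, by omega, h4⟩
      have hd : p ∣ n := Nat.dvd_iff_mod_eq_zero.mpr h.2.2
      have hk : (stripB p (n / p) (e + 1)).2 - e = ((stripB p (n / p) (e + 1)).2 - (e + 1)) + 1 := by omega
      rw [hk, pow_succ, ← Nat.mul_assoc, h1]
      exact Nat.div_mul_cancel hd
    · rename_i h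
      refine ⟨by simp, ?_, le_refl e, hn⟩
      intro hdvd
      exact h ⟨hp, hn, Nat.dvd_iff_mod_eq_zero.mp hdvd⟩

def prodF (L : List (Nat × Nat)) : Nat := L.foldr (fun pe acc => pe.1 ^ pe.2 * acc) 1

theorem facLoopB_spec : ∀ (p n : Nat), 2 ≤ p → 0 < n → (∀ q, 2 ≤ q → q < p → ¬ q ∣ n) →
    prodF (facLoopB p n) = n ∧ ∀ pe ∈ facLoopB p n, pe.1.Prime := by
  intro p n
  induction p, n using facLoopB.induct with
  | case1 p n h hmod s ih =>
    intro hp hn hinv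
    have hd : p ∣ n := Nat.dvd_iff_mod_eq_zero.mpr hmod
    obtain ⟨h1, h2, _, h4⟩ := stripB_spec p hp n hn 0
    simp only [Nat.sub_zero] at h1
    have hsdvd : s.1 ∣ n := ⟨p ^ s.2, h1.symm⟩
    have hinv' : ∀ q, 2 ≤ q → q < p + 1 → ¬ q ∣ s.1 := by
      intro q hq2 hqp hqd
      rcases Nat.lt_succ_iff_lt_or_eq.mp hqp with hlt | rfl
      · exact hinv q hq2 hlt (hqd.trans hsdvd)
      · exact h2 hqd
    obtain ⟨ihp, ihpr⟩ := ih (by omega) h4 hinv'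
    have hprime : p.Prime := by
      rw [Nat.prime_def_lt]
      refine ⟨hp, fun m hm hmd => ?_⟩
      by_contra hm1
      have hm0 : m ≠ 0 := by rintro rfl; simp at hmd; omega
      exact hinv m (by omega) hm (hmd.trans hd)
    rw [facLoopB, dif_pos h, if_pos hmod]
    constructor
    · simp only [prodF, List.foldr_cons]
      show p ^ (stripB p n 0).2 * prodF (facLoopB (p+1) (stripB p n 0).1) = n
      rw [ihp, Nat.mul_comm]
      exact h1
    · intro pe hpe
      rcases List.mem_cons.mp hpe with rfl | hmem
      · exact hprime
      · exact ihpr pe hmem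
  | case2 p n h hmod ih =>
    intro hp hn hinv
    have hinv' : ∀ q, 2 ≤ q → q < p + 1 → ¬ q ∣ n := by
      intro q hq2 hqp hqd
      rcases Nat.lt_succ_iff_lt_or_eq.mp hqp with hlt | rfl
      · exact hinv q hq2 hlt hqd
      · exact hmod (Nat.dvd_iff_mod_eq_zero.mp hqd)
    obtain ⟨ihp, ihpr⟩ := ih (by omega) hn hinv'
    rw [facLoopB, dif_pos h, if_neg hmod]
    exact ⟨ihp, ihpr⟩
  | case3 p n h h1 =>
    intro hp hn hinv
    rw [facLoopB, dif_neg h, if_pos h1]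
    · have hnp : n.Prime := by
        by_contra hnp
        have hsq := Nat.minFac_sq_le_self hn hnp
        have hmf : n.minFac ∣ n := Nat.minFac_dvd n
        have hmf2 : 2 ≤ n.minFac := (Nat.minFac_prime (by omega)).two_le
        have hnlt : n < p * p := by
          by_contra hge
          exact h ⟨hp, by omega⟩
        have : n.minFac < p := by nlinarith [sq_nonneg (n.minFac - p)]
        exact hinv n.minFac hmf2 this hmf
      refine ⟨by simp [prodF], ?_⟩
      intro pe hpe
      simp at hpe
      rw [hpe]
      exact hnp
  | case4 p n h h1 =>
    intro hp hn hinv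
    rw [facLoopB, dif_neg h, if_neg h1]
    exact ⟨by simp [prodF]; omega, by simp⟩

-- one step of Source B's divisor-set comprehension
def stepD (ds : PySem.Set Nat) (pe : Nat × Nat) : PySem.Set Nat :=
  PySem.Set.ofList (ds.flatMap (fun d => (List.range (2 * pe.2 + 1)).map (fun k => d * pe.1 ^ k)))

theorem fold_divs_mem : ∀ (L : List (Nat × Nat)), (∀ pe ∈ L, pe.1.Prime) →
    ∀ (s : PySem.Set Nat) (c : Nat), 0 < c → (∀ d, d ∈ s ↔ d ∣ c * c) →
    ∀ d, d ∈ L.foldl stepD s ↔ d ∣ (c * prodF L) * (c * prodF L) := by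
  intro L
  induction L with
  | nil =>
    intro _ s c hc hs d
    simpa [prodF] using hs d
  | cons pe L ih =>
    intro hpr s c hc hs d
    obtain ⟨p, e⟩ := pe
    have hp : p.Prime := hpr (p, e) (by simp)
    have hstep : ∀ d, d ∈ stepD s (p, e) ↔ d ∣ (c * p ^ e) * (c * p ^ e) := by
      intro d
      rw [stepD, PySem.Set.mem_ofList, List.mem_flatMap]
      constructor
      · rintro ⟨d0, hd0, hmem⟩
        simp only [List.mem_map, List.mem_range] at hmem
        obtain ⟨k, hk, rfl⟩ := hmem
        have h1 : d0 ∣ c * c := (hs d0).mp hd0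
        have h2 : p ^ k ∣ p ^ (2 * e) := pow_dvd_pow p (by omega)
        calc d0 * p ^ k ∣ (c * c) * p ^ (2 * e) := mul_dvd_mul h1 h2
          _ = (c * p ^ e) * (c * p ^ e) := by ring
      · intro hd
        have hd' : d ∣ (c * c) * p ^ (2 * e) := by
          have : (c * p ^ e) * (c * p ^ e) = (c * c) * p ^ (2 * e) := by ring
          rwa [this] at hd
        obtain ⟨x, y, hx, hy, hxy⟩ := Nat.dvd_mul.mp hd'
        obtain ⟨k, hk, rfl⟩ := (Nat.dvd_prime_pow hp).mp hy
        exact ⟨x, (hs x).mpr hx, by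
          simp only [List.mem_map, List.mem_range]
          exact ⟨k, by omega, hxy⟩⟩
    have := ih (fun q hq => hpr q (by simp [hq])) (stepD s (p, e)) (c * p ^ e)
      (Nat.mul_pos hc (pow_pos hp.pos e)) hstep d
    simp only [List.foldl_cons]
    rw [this]
    have : c * p ^ e * prodF L = c * prodF ((p, e) :: L) := by
      simp [prodF]; ring
    rw [this]

theorem fold_divs_nodup : ∀ (L : List (Nat × Nat)) (s : PySem.Set Nat), s.Nodup →
    (L.foldl stepD s).Nodup := by
  intro L
  induction L with
  | nil => intro s hs; exact hs
  | cons pe L ih =>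
    intro s hs
    exact ih (stepD s pe) (PySem.Set.nodup_ofList _)

theorem countB_eq_ref (A : Int) : count_alt A = refCount A A.natAbs := by
  unfold count_alt
  dsimp only
  set a := A.natAbs with ha
  by_cases h0 : a = 0
  · rw [h0]
    rw [show facLoopB 2 0 = [] from by rw [facLoopB]; norm_num]
    simp [refCount, PySem.Set.ofList, PySem.Set.add, List.foldl]
  · have hapos : 0 < a := Nat.pos_of_ne_zero h0
    obtain ⟨hprod, hprimes⟩ := facLoopB_spec 2 a (le_refl 2) hapos (by omega)
    set fac := facLoopB 2 a with hfac
    -- the divisor set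
    have hfold : fac.foldl
        (fun ds pe => PySem.Set.ofList (ds.flatMap (fun d => (List.range (2 * pe.2 + 1)).map (fun k => d * pe.1 ^ k))))
        (PySem.Set.ofList [1]) = fac.foldl stepD (PySem.Set.ofList [1]) := rfl
    rw [hfold]
    set divs := fac.foldl stepD (PySem.Set.ofList [1]) with hdivs
    have hmem : ∀ d, d ∈ divs ↔ d ∣ a * a := by
      intro d
      have := fold_divs_mem fac hprimes (PySem.Set.ofList [1]) 1 (by omega)
        (by intro d; simp [PySem.Set.mem_ofList, Nat.dvd_one]) d
      rwa [one_mul, hprod] at this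
    have hnd : divs.Nodup := fold_divs_nodup fac _ (PySem.Set.nodup_ofList _)
    -- the counting fold is a countP
    have hcnt : divs.foldl
        (fun cnt d => if d ≤ a then
           let m := a * a / d
           if (m - d) % 2 = 0 ∧ (((m - d) / 2 : Nat) : Int) > A then cnt + 1 else cnt
         else cnt) 0
        = ((divs.filter (fun d => decide (d ≤ a ∧ (a * a / d - d) % 2 = 0 ∧ (((a * a / d - d) / 2 : Nat) : Int) > A))).length : Int) := by
      have hfun : (fun (cnt : Int) (d : Nat) => if d ≤ a then
           let m := a * a / d
           if (m - d) % 2 = 0 ∧ (((m - d) / 2 : Nat) : Int) > A then cnt + 1 else cnt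
         else cnt)
        = (fun (cnt : Int) (d : Nat) =>
            if (fun d => decide (d ≤ a ∧ (a * a / d - d) % 2 = 0 ∧ (((a * a / d - d) / 2 : Nat) : Int) > A)) d = true
            then cnt + 1 else cnt) := by
        funext cnt d
        by_cases h1 : d ≤ a
        · by_cases h2 : (a * a / d - d) % 2 = 0 ∧ (((a * a / d - d) / 2 : Nat) : Int) > A
          · simp [h1, h2]
          · simp only [h1, if_true]
            simp
        · simp [h1]
      rw [hfun, PySem.List.foldl_count_if, List.countP_eq_length_filter]
      simp
    rw [hcnt]
    congr 1
    -- the filtered divisor list is a permutation of the filtered range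
    apply List.Perm.length_eq
    apply (List.perm_ext_iff_of_nodup (hnd.filter _) ((List.nodup_range' ).filter _)).mpr
    intro x
    simp only [List.mem_filter, hmem x, List.mem_range'_1, decide_eq_true_eq]

    constructor
    · rintro ⟨hdvd, hle, h2, h3⟩
      have hx : 0 < x := Nat.pos_of_dvd_of_pos hdvd (by positivity)
      exact ⟨⟨hx, by omega⟩, hdvd, h2, h3⟩
    · rintro ⟨⟨hx1, hx2⟩, hdvd, h2, h3⟩
      exact ⟨hdvd, by omega, h2, h3⟩

theorem fold_filter_add (P : Int → Prop) [DecidablePred P] :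
    ∀ (l : List Int) (s : PySem.Set Int), l.Nodup → (∀ x ∈ l, x ∉ s) →
    l.foldl (fun s i => if P i then PySem.Set.add s i else s) s
      = s ++ l.filter (fun i => decide (P i)) := by
  intro l
  induction l with
  | nil => intro s _ _; simp
  | cons x l ih =>
    intro s hnd hdisj
    simp only [List.foldl_cons, List.filter_cons]
    by_cases hP : P x
    · rw [if_pos hP, PySem.Set.add_of_not_mem (hdisj x (by simp))]
      rw [ih (s ++ [x]) (List.nodup_cons.mp hnd).2 ?_]
      · simp [hP]
      · intro y hy hmem
        rcases List.mem_append.mp hmem with hys | hyx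
        · exact hdisj y (by simp [hy]) hys
        · exact (List.nodup_cons.mp hnd).1 ((List.mem_singleton.mp hyx) ▸ hy)
    · rw [if_neg hP, ih s (List.nodup_cons.mp hnd).2 (fun y hy => hdisj y (by simp [hy]))]
      simp [hP]

theorem countA_eq_ref (A : Int) : count A = refCount A A.natAbs := by
  unfold count
  dsimp only
  set a := A.natAbs with ha
  have ha2 : A ^ 2 = ((a * a : Nat) : Int) := by
    rw [pow_two, ← Int.natAbs_mul_self]
  rw [ha2]
  have hisq : ((((a * a : Nat) : Int)).toNat.sqrt : Int) = (a : Int) := by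
    rw [Int.toNat_natCast, Nat.sqrt_eq]
  rw [hisq]
  -- first loop: the divisor set is the filtered range
  rw [show (PySem.Set.empty : PySem.Set Int) = ([] : List Int) from rfl]
  rw [fold_filter_add (fun i => PySem.Int.mod ((a*a : Nat) : Int) i = 0)
      (PySem.List.pyRange 1 ((a : Int) + 1) 1) []
      (PySem.List.nodup_pyRange_one 1 ((a : Int) + 1)) (by simp)]
  rw [List.nil_append]
  -- second loop: a countP
  have hfun : (fun (cnt : Int) (n : Int) =>
        let m := PySem.Int.floordiv ((a*a : Nat) : Int) n
        if PySem.Int.mod (m + n) 2 = PySem.Int.mod (m - n) 2 ∧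
           PySem.Int.mod (m - n) 2 = 0 ∧ PySem.Int.floordiv (m - n) 2 > A
        then cnt + 1 else cnt)
      = (fun (cnt : Int) (n : Int) =>
          if (fun n => decide (PySem.Int.mod (PySem.Int.floordiv ((a*a : Nat) : Int) n + n) 2 = PySem.Int.mod (PySem.Int.floordiv ((a*a : Nat) : Int) n - n) 2 ∧
             PySem.Int.mod (PySem.Int.floordiv ((a*a : Nat) : Int) n - n) 2 = 0 ∧
             PySem.Int.floordiv (PySem.Int.floordiv ((a*a : Nat) : Int) n - n) 2 > A)) n = true
          then cnt + 1 else cnt) := by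
    funext cnt n
    simp
  rw [hfun, PySem.List.foldl_count_if, List.countP_filter, Int.zero_add]
  unfold refCount
  rw [← List.countP_eq_length_filter]
  congr 1
  rw [PySem.List.pyRange_one]
  have htn : ((a : Int) + 1 - 1).toNat = a := by omega
  rw [htn, List.countP_map, List.range'_eq_map_range, List.countP_map]
  apply List.countP_congr
  intro k hk
  rw [List.mem_range] at hk
  simp only [Function.comp_apply]
  have hcast : (1:Int) + (k : Int) = ((1 + k : Nat) : Int) := by push_cast; ring
  rw [hcast]
  set n := 1 + k with hnk
  have hn1 : 1 ≤ n := by omega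
  have hn2 : n ≤ a := by omega
  simp only [Bool.and_eq_true, decide_eq_true_eq]
  have hdvd_iff : PySem.Int.mod ((a*a : Nat) : Int) (n : Int) = 0 ↔ n ∣ a * a := by
    rw [PySem.Int.mod_natCast]
    constructor
    · intro h
      exact Nat.dvd_iff_mod_eq_zero.mpr (by exact_mod_cast h)
    · intro h
      rw [Nat.mod_eq_zero_of_dvd h]
      rfl

  by_cases hdvd : n ∣ a * a
  · have hmge : n ≤ a * a / n := by
      have haa : 1 ≤ a := by omega
      calc n ≤ a := hn2
        _ = a * a / a := by rw [Nat.mul_div_cancel_left a (by omega)]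
        _ ≤ a * a / n := Nat.div_le_div_left (by omega) (by omega)
    have hm : PySem.Int.floordiv ((a*a : Nat) : Int) (n : Int) = ((a * a / n : Nat) : Int) :=
      PySem.Int.floordiv_natCast (a*a) n
    rw [hm, hdvd_iff]
    simp only [PySem.Int.mod_eq_emod_of_pos (show (0:Int) < 2 by norm_num),
               PySem.Int.floordiv_eq_ediv_of_pos (show (0:Int) < 2 by norm_num)]
    constructor
    · rintro ⟨⟨h1, h2, h3⟩, hd⟩
      exact ⟨hd, by omega, by omega⟩
    · rintro ⟨hd, h2, h3⟩
      exact ⟨⟨by omega, by omega, by omega⟩, hd⟩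
  · rw [hdvd_iff]
    constructor
    · rintro ⟨h, hd⟩
      exact absurd hd hdvd
    · rintro ⟨hd, h⟩
      exact absurd hd hdvd

-- ===== VERDICT (by name: the statement is the Claim_ definition above) =====
theorem count_spec : Claim_equal_count := by
  intro A _
  unfold Spec_count
  rw [countA_eq_ref, countB_eq_ref]
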